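-- pv_equiv track=rewrite | github.com/rpural/DailyCodingProblem | tripleuptest.py | tripleUp2
-- ===== SOURCE A (Python) =====
-- def tripleUp2(nums):
--     count = 0
--     foo = False
--
--     for i in range(len(nums)):
--         if i < len(nums)-1:
--             if nums[i+1] - nums[i] == 1:
--                 count += 1
--             else:
--                 count = 0
--         if count == 2:
--             foo = True
--     return foo
-- ===== SOURCE B (Python) =====
-- def tripleUp2(nums):
--     return any(nums[i + 1] - nums[i] == 1 and nums[i + 2] - nums[i + 1] == 1
--                for i in range(len(nums) - 2))
-- ===== Notes on version B (the rewrite author's own statement) =====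
-- stated objective: simpler
-- what changed: Replaces the running run-length counter with reset logic by a stateless any() over each length-3 window, testing the two adjacent differences locally.
import Mathlib
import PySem

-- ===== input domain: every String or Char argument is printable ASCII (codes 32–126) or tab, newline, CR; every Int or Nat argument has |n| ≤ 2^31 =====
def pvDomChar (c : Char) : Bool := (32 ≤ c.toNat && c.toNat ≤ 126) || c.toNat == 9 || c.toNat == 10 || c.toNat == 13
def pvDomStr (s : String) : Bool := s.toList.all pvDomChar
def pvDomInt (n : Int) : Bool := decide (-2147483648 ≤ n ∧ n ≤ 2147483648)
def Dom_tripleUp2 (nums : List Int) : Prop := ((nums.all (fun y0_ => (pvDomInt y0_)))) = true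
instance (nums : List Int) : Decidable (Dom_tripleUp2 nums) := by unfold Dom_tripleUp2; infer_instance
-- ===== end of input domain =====

-- B replaces A's running counter with reset logic by a stateless test of each length-3 window (objective: simpler).

-- ===== PORT A =====
-- one iteration of A's for-loop body: state is (count, foo)
-- (all indexings are in range because they are guarded by 'i < len(nums)-1'; pyGetD is the exact total form there)
def stepA (nums : List Int) (st : Int × Bool) (i : Int) : Int × Bool :=
  let count := if i < (nums.length : Int) - 1 then
      (if PySem.List.pyGetD nums (i + 1) 0 - PySem.List.pyGetD nums i 0 = 1 then st.1 + 1 else 0)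
    else st.1
  (count, if count = 2 then true else st.2)

def tripleUp2 (nums : List Int) : Bool :=
  ((PySem.List.pyRange 0 (nums.length : Int) 1).foldl (stepA nums) (0, false)).2

-- ===== PORT B =====
-- the generator's test for window i
def predB (nums : List Int) (i : Int) : Bool :=
  decide (PySem.List.pyGetD nums (i + 1) 0 - PySem.List.pyGetD nums i 0 = 1) &&
  decide (PySem.List.pyGetD nums (i + 2) 0 - PySem.List.pyGetD nums (i + 1) 0 = 1)

def tripleUp2_alt (nums : List Int) : Bool :=
  (PySem.List.pyRange 0 ((nums.length : Int) - 2) 1).any (predB nums)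

-- ===== PRECONDITION & SPEC =====
def Spec_tripleUp2 (nums : List Int) (out : Bool) : Prop := out = tripleUp2_alt nums
instance (nums : List Int) (out : Bool) : Decidable (Spec_tripleUp2 nums out) := by unfold Spec_tripleUp2; infer_instance

-- ===== CLAIM (what is proved, stated in full; the proofs are below) =====
def Claim_equal_tripleUp2 : Prop := ∀ (nums : List Int), Dom_tripleUp2 nums → Spec_tripleUp2 nums (tripleUp2 nums)

-- ===== LEMMAS AND PROOFS =====

-- the list of adjacent "difference is one" flags
def bsL (nums : List Int) : List Bool :=
  List.zipWith (fun a b => decide (b - a = (1:Int))) nums nums.tail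

-- A's loop, re-expressed structurally over the flag list (the trailing ‖ decide (c = 2) is A's
-- final iteration i = n-1, which only re-checks count == 2)
def fA : List Bool → Int → Bool → Bool
  | [], c, f => f || decide (c = 2)
  | b :: t, c, f =>
      let c' := if b then c + 1 else 0
      fA t c' (f || decide (c' = 2))

-- B, re-expressed structurally: two adjacent flags both set
def twoAdj : List Bool → Bool
  | b1 :: b2 :: t => (b1 && b2) || twoAdj (b2 :: t)
  | _ => false

-- accumulator-free tail of fA
def hR : Int → List Bool → Bool
  | c, [] => decide (c = 2)
  | c, b :: t =>
      let c' := if b then c + 1 else 0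
      decide (c' = 2) || hR c' t

theorem length_bsL (nums : List Int) : (bsL nums).length = nums.length - 1 := by
  simp [bsL]

theorem fA_eq (bs : List Bool) : ∀ (c : Int) (f : Bool), fA bs c f = (f || hR c bs) := by
  induction bs with
  | nil => intro c f; simp [fA, hR]
  | cons b t ih => intro c f; simp [fA, hR, ih, Bool.or_assoc]

theorem hR_twoAdj (bs : List Bool) :
    hR 0 bs = twoAdj (false :: bs) ∧ hR 1 bs = twoAdj (true :: bs) := by
  induction bs with
  | nil => simp [hR, twoAdj]
  | cons b t ih =>
    cases b with
    | false => simp [hR, twoAdj, ih.1]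
    | true => constructor
              · simpa [hR, twoAdj] using ih.2
              · simp [hR, twoAdj]

theorem twoAdj_false_cons (bs : List Bool) : twoAdj (false :: bs) = twoAdj bs := by
  cases bs <;> simp [twoAdj]

theorem bsL_drop (nums : List Int) (j : Nat) (h : j + 1 < nums.length) :
    (bsL nums).drop j =
      decide (nums.getD (j + 1) 0 - nums.getD j 0 = 1) :: (bsL nums).drop (j + 1) := by
  have hj : j < (bsL nums).length := by rw [length_bsL]; omega
  rw [List.drop_eq_getElem_cons hj]
  congr 1
  have h1 : j < nums.tail.length := by simp [List.length_tail]; omega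
  have h2 : j < nums.length := by omega
  have h3 : j + 1 < nums.length := h
  simp [bsL, List.getElem_zipWith, List.getElem_tail,
        List.getElem?_eq_getElem h2, List.getElem?_eq_getElem h3, List.getD]

theorem bridgeA (nums : List Int) :
    ∀ (k j : Nat) (c : Int) (f : Bool), j + k = nums.length →
      ((List.range' j k).foldl (fun st (i : Nat) => stepA nums st (i : Int)) (c, f)).2 =
        (if k = 0 then f else fA ((bsL nums).drop j) c f) := by
  intro k
  induction k with
  | zero => intro j c f _; simp
  | succ k ih =>
    intro j c f hjk
    rw [List.range'_succ]
    simp only [List.foldl_cons]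
    rcases Nat.eq_zero_or_pos k with hk | hk
    · -- last iteration: i = n - 1, the guard is false
      subst hk
      have hcond : ¬ ((j : Int) < (nums.length : Int) - 1) := by omega
      have hdrop : (bsL nums).drop j = [] := by
        apply List.drop_eq_nil_of_le
        rw [length_bsL]; omega
      simp [stepA, hcond, hdrop, fA, Bool.or_comm]
    · -- a real iteration: the guard holds
      have hcond : ((j : Int) < (nums.length : Int) - 1) := by omega
      have hj1 : j + 1 < nums.length := by omega
      have hcast1 : (j : Int) + 1 = ((j + 1 : Nat) : Int) := by push_cast; ring
      rw [ih (j + 1) _ _ (by omega)]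
      have hk0 : ¬ (k = 0) := by omega
      simp only [hk0, if_false]
      rw [bsL_drop nums j hj1]
      simp only [stepA, hcond, if_pos, hcast1, PySem.List.pyGetD_natCast, fA]
      split <;> simp_all [Bool.or_comm]

theorem bridgeB (nums : List Int) :
    ∀ (k j : Nat), j + k + 1 = (bsL nums).length →
      (List.range' j k).any (fun (i : Nat) => predB nums (i : Int)) =
        twoAdj ((bsL nums).drop j) := by
  intro k
  induction k with
  | zero =>
    intro j hk
    have : ((bsL nums).drop j).length = 1 := by simp; omega
    rcases h : (bsL nums).drop j with _ | ⟨b, _ | t⟩ <;> simp_all [twoAdj]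
  | succ k ih =>
    intro j hjk
    have hlen := length_bsL nums
    have hj1 : j + 1 < nums.length := by omega
    have hj2 : j + 2 < nums.length := by omega
    rw [List.range'_succ]
    simp only [List.any_cons]
    rw [ih (j + 1) (by omega)]
    rw [bsL_drop nums j hj1, bsL_drop nums (j + 1) hj2]
    have hcast1 : (j : Int) + 1 = ((j + 1 : Nat) : Int) := by push_cast; ring
    have hcast2 : (j : Int) + 2 = ((j + 2 : Nat) : Int) := by push_cast; ring
    have hcast3 : ((j + 1 : Nat) : Int) + 1 = ((j + 2 : Nat) : Int) := by push_cast; ring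
    simp only [predB, hcast1, hcast2, PySem.List.pyGetD_natCast, twoAdj]

-- convert each port's pyRange fold to a range' fold over Nat
theorem tripleUp2_eq_fA (nums : List Int) :
    tripleUp2 nums = (if nums.length = 0 then false else fA (bsL nums) 0 false) := by
  unfold tripleUp2
  rw [PySem.List.pyRange_one]
  have h1 : ((nums.length : Int) - 0).toNat = nums.length := by omega
  rw [h1, List.foldl_map, List.range_eq_range']
  have := bridgeA nums nums.length 0 0 false (by omega)
  simp only [zero_add] at this ⊢
  rw [this]
  simp [List.drop_zero]

theorem tripleUp2_alt_eq_twoAdj (nums : List Int) :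
    tripleUp2_alt nums = twoAdj (bsL nums) := by
  unfold tripleUp2_alt
  rw [PySem.List.pyRange_one]
  have h1 : ((nums.length : Int) - 2 - 0).toNat = nums.length - 2 := by omega
  rw [h1, List.any_map, List.range_eq_range']
  rcases Nat.lt_or_ge nums.length 2 with hle | hgt
  · have h2 : nums.length - 2 = 0 := by omega
    have hb : (bsL nums).length ≤ 1 := by rw [length_bsL]; omega
    rcases hbs : bsL nums with _ | ⟨b, _ | t⟩ <;> simp_all [twoAdj]
  · have hlen : (0 : Nat) + (nums.length - 2) + 1 = (bsL nums).length := by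
      rw [length_bsL]; omega
    have := bridgeB nums (nums.length - 2) 0 hlen
    simpa [Function.comp] using this

-- ===== VERDICT (by name: the statement is the Claim_ definition above) =====
theorem tripleUp2_spec : Claim_equal_tripleUp2 := by
  intro nums _
  unfold Spec_tripleUp2
  rw [tripleUp2_eq_fA, tripleUp2_alt_eq_twoAdj]
  rcases Nat.eq_zero_or_pos nums.length with h | h
  · have : bsL nums = [] := by
      have := length_bsL nums; apply List.eq_nil_of_length_eq_zero; omega
    simp [h, this, twoAdj]
  · have hne : ¬ (nums.length = 0) := by omega
    rw [if_neg hne, fA_eq, (hR_twoAdj (bsL nums)).1, twoAdj_false_cons]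
    simp
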